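-- pv_equiv track=rewrite | github.com/meural-operator/ramanujan_engineV2 | modules/continued_fractions/utils/convergent_fingerprint.py | _compact_poly_series
-- ===== SOURCE A (Python) =====
-- def _compact_poly_series(coef, n_terms):
--     """Evaluate a compact polynomial [c_d, ..., c_0] at n = 0, 1, ..., n_terms-1."""
--     series = []
--     for n in range(n_terms):
--         val = 0
--         for c in coef:
--             val = val * n + c
--         series.append(val)
--     return series
-- ===== SOURCE B (Python) =====
-- def _compact_poly_series(coef, n_terms):
--     """Evaluate via finite differences: seed the first deg+1 values directly, then
--     extend by prefix-summing the running difference vector (additions only)."""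
--     if not coef:
--         return [0] * n_terms
--     d1 = len(coef)
--     seed = [_horner(coef, n) for n in range(min(n_terms, d1))]
--     if n_terms <= d1:
--         return seed
--     # rw[t] = (d1-1-t)-th forward difference, anchored so rw[-1] is the latest value
--     rw, cur = [], seed
--     while cur:
--         rw.append(cur[-1])
--         cur = [b - a for a, b in zip(cur, cur[1:])]
--     rw.reverse()
--     series = seed[:]
--     for _ in range(n_terms - d1):
--         new, acc = [], 0
--         for x in rw:
--             acc += x
--             new.append(acc)
--         rw = new
--         series.append(acc)
--     return series
--
-- def _horner(coef, n):
--     v = 0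
--     for c in coef:
--         v = v * n + c
--     return v
-- ===== Notes on version B (the rewrite author's own statement) =====
-- stated objective: alternative
-- what changed: B evaluates the polynomial by the method of finite differences: it runs Horner only at the first deg+1 points, builds the forward-difference vector from those values, and generates every later term by one prefix-sum pass over that vector (additions only, no multiplications), instead of A's full Horner evaluation at every point.
import Mathlib
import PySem

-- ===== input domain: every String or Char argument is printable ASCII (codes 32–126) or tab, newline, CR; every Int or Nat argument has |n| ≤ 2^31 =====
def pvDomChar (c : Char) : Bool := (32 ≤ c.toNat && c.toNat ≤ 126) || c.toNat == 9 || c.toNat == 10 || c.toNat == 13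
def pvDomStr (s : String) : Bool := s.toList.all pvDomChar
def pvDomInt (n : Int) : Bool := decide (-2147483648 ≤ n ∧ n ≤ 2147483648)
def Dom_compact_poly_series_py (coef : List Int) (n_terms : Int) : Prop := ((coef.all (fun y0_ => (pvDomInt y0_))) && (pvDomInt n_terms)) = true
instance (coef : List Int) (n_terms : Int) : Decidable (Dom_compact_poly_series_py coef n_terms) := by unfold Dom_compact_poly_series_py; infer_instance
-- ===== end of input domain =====

-- B evaluates the polynomial by finite differences (seed deg+1 direct values, then extend by
-- prefix-summing the difference vector) instead of running Horner at every point (alternative).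

-- ===== PORT A =====
def compact_poly_series_py (coef : List Int) (n_terms : Int) : List Int :=
  (PySem.List.pyRange 0 n_terms 1).foldl
    (fun series n => series ++ [coef.foldl (fun val c => val * n + c) 0]) []

-- ===== PORT B =====
-- helper _horner of Source B
def pvHorner (coef : List Int) (n : Int) : Int :=
  coef.foldl (fun v c => v * n + c) 0

-- 'cur = [b - a for a, b in zip(cur, cur[1:])]'
def pvDiffsRow (cur : List Int) : List Int :=
  (cur.zip cur.tail).map (fun p => p.2 - p.1)

-- the 'while cur:' loop collecting cur[-1] of each difference row (cur[-1] exact: cur nonempty here)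
def pvCollectLasts : List Int → List Int
  | [] => []
  | x :: xs => (x :: xs).getLast (List.cons_ne_nil x xs) :: pvCollectLasts (pvDiffsRow (x :: xs))
termination_by l => l.length
decreasing_by simp [pvDiffsRow, List.length_zip]

-- the 'for _ in range(n_terms - d1):' loop: one prefix-sum pass over rw, append the final acc
def pvExtend : Nat → List Int → List Int → List Int
  | 0, _, series => series
  | k+1, rw, series =>
    let p := rw.foldl (fun (p : List Int × Int) x => (p.1 ++ [p.2 + x], p.2 + x)) ([], 0)
    pvExtend k p.1 (series ++ [p.2])

def compact_poly_series_py_alt (coef : List Int) (n_terms : Int) : List Int :=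
  if coef.isEmpty then List.replicate n_terms.toNat 0
  else
    let d1 : Int := coef.length
    let seed := (PySem.List.pyRange 0 (min n_terms d1) 1).map (fun n => pvHorner coef n)
    if n_terms ≤ d1 then seed
    else pvExtend (n_terms - d1).toNat ((pvCollectLasts seed).reverse) seed

-- ===== PRECONDITION & SPEC =====
def Spec_compact_poly_series_py (coef : List Int) (n_terms : Int) (out : List Int) : Prop := out = compact_poly_series_py_alt coef n_terms
instance (coef : List Int) (n_terms : Int) (out : List Int) : Decidable (Spec_compact_poly_series_py coef n_terms out) := by unfold Spec_compact_poly_series_py; infer_instance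

-- ===== CLAIM (what is proved, stated in full; the proofs are below) =====
def Claim_equal_compact_poly_series_py : Prop := ∀ (coef : List Int) (n_terms : Int), Dom_compact_poly_series_py coef n_terms → Spec_compact_poly_series_py coef n_terms (compact_poly_series_py coef n_terms)

-- ===== LEMMAS AND PROOFS =====

-- forward difference operator and its iterates
def pvDelta (f : Int → Int) : Int → Int := fun n => f (n + 1) - f n

def pvDeltaIter : Nat → (Int → Int) → Int → Int
  | 0, f => f
  | k+1, f => pvDeltaIter k (pvDelta f)

-- [f j, f (j+1), ..., f (j+m-1)]
def pvSeedList (f : Int → Int) : Nat → Int → List Int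
  | 0, _ => []
  | m+1, j => f j :: pvSeedList f m (j + 1)

-- [Δ^m f (j-m), Δ^(m-1) f (j-m+1), ..., Δ^0 f j]  (anchor j = latest point)
def pvRD (f : Int → Int) : Nat → Int → List Int
  | 0, j => [f j]
  | m+1, j => pvDeltaIter (m+1) f (j - (m+1)) :: pvRD f m j

-- prefix sums with initial accumulator
def pvPS (a : Int) : List Int → List Int
  | [] => []
  | x :: xs => (a + x) :: pvPS (a + x) xs

theorem pv_iter_outer (k : Nat) (f : Int → Int) (j : Int) :
    pvDeltaIter (k+1) f j = pvDelta (pvDeltaIter k f) j := by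
  induction k generalizing f j with
  | zero => rfl
  | succ k ih => exact ih (pvDelta f) j

theorem pv_iter_congr (k : Nat) (f g : Int → Int) (h : ∀ n, f n = g n) (j : Int) :
    pvDeltaIter k f j = pvDeltaIter k g j := by
  induction k generalizing f g with
  | zero => exact h j
  | succ k ih => exact ih (pvDelta f) (pvDelta g) (fun n => by simp only [pvDelta, h])

theorem pv_iter_add (k : Nat) (f g : Int → Int) (j : Int) :
    pvDeltaIter k (fun n => f n + g n) j = pvDeltaIter k f j + pvDeltaIter k g j := by
  induction k generalizing f g with
  | zero => rfl
  | succ k ih =>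
    show pvDeltaIter k (pvDelta (fun n => f n + g n)) j = _
    rw [pv_iter_congr k _ (fun n => pvDelta f n + pvDelta g n)
      (fun n => by simp [pvDelta]; ring)]
    exact ih (pvDelta f) (pvDelta g)

theorem pv_iter_smul (k : Nat) (c : Int) (f : Int → Int) (j : Int) :
    pvDeltaIter k (fun n => c * f n) j = c * pvDeltaIter k f j := by
  induction k generalizing f with
  | zero => rfl
  | succ k ih =>
    show pvDeltaIter k (pvDelta (fun n => c * f n)) j = _
    rw [pv_iter_congr k _ (fun n => c * pvDelta f n) (fun n => by simp [pvDelta]; ring)]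
    exact ih (pvDelta f)

theorem pv_iter_zero (k : Nat) (j : Int) : pvDeltaIter k (fun _ => (0 : Int)) j = 0 := by
  induction k generalizing j with
  | zero => rfl
  | succ k ih =>
    show pvDeltaIter k (pvDelta (fun _ => 0)) j = 0
    rw [pv_iter_congr k _ (fun _ => (0 : Int)) (fun n => by simp [pvDelta])]
    exact ih j

theorem pv_iter_mono (a b : Nat) (f : Int → Int) (hab : a ≤ b)
    (h : ∀ n, pvDeltaIter a f n = 0) : ∀ n, pvDeltaIter b f n = 0 := by
  induction b with
  | zero => intro n; have : a = 0 := Nat.le_zero.mp hab; exact this ▸ h n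
  | succ b ih =>
    intro n
    rcases Nat.lt_or_ge a (b+1) with hlt | hge
    · have hb := ih (Nat.lt_succ_iff.mp hlt)
      rw [pv_iter_outer]
      simp [pvDelta, hb]
    · have : a = b + 1 := le_antisymm hab hge
      exact this ▸ h n

theorem pv_iter_sum (k : Nat) (M : Nat) (F : Nat → Int → Int) (j : Int) :
    pvDeltaIter k (fun n => ∑ i ∈ Finset.range M, F i n) j
      = ∑ i ∈ Finset.range M, pvDeltaIter k (F i) j := by
  induction M with
  | zero => simpa using pv_iter_zero k j
  | succ M ih =>
    rw [Finset.sum_range_succ, ← ih, ← pv_iter_add]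
    exact pv_iter_congr _ _ _ (fun n => by rw [Finset.sum_range_succ]) j

-- the (k+1)-st difference of n^k vanishes
theorem pv_iter_pow (k : Nat) : ∀ j, pvDeltaIter (k+1) (fun n => n ^ k) j = 0 := by
  induction k using Nat.strong_induction_on with
  | _ k ih =>
    intro j
    show pvDeltaIter k (pvDelta (fun n => n ^ k)) j = 0
    have hbin : ∀ n : Int, pvDelta (fun n => n ^ k) n
        = ∑ i ∈ Finset.range k, (Nat.choose k i : Int) * n ^ i := by
      intro n
      have := add_pow n 1 k
      simp only [one_pow, mul_one] at this
      show (n+1)^k - n^k = _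
      rw [this, Finset.sum_range_succ, Nat.choose_self]
      rw [Finset.sum_congr rfl (fun i _ => mul_comm ((n:Int)^i) ((Nat.choose k i : Int)))]
      push_cast
      ring
    rw [pv_iter_congr k _ _ hbin, pv_iter_sum]
    refine Finset.sum_eq_zero (fun i hi => ?_)
    have hi' : i < k := Finset.mem_range.mp hi
    rw [pv_iter_smul]
    have hz : ∀ n, pvDeltaIter (i+1) (fun n => n ^ i) n = 0 := ih i hi'
    rw [pv_iter_mono (i+1) k _ hi' hz j, mul_zero]

theorem pv_horner_cons (c : Int) (cs : List Int) (n : Int) :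
    pvHorner (c :: cs) n = c * n ^ cs.length + pvHorner cs n := by
  have key : ∀ (l : List Int) (v : Int),
      l.foldl (fun a c => a * n + c) v = v * n ^ l.length + l.foldl (fun a c => a * n + c) 0 := by
    intro l
    induction l with
    | nil => intro v; simp
    | cons x xs ih =>
      intro v
      simp only [List.foldl_cons, List.length_cons]
      rw [ih (v * n + x), ih (0 * n + x)]
      ring
  simp only [pvHorner, List.foldl_cons]
  rw [key cs (0 * n + c)]
  ring

-- the |coef|-th difference of the Horner polynomial vanishes
theorem pv_horner_vanish (coef : List Int) : ∀ j, pvDeltaIter coef.length (pvHorner coef) j = 0 := by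
  induction coef with
  | nil => intro j; simp [pvDeltaIter, pvHorner]
  | cons c cs ih =>
    intro j
    rw [pv_iter_congr (c :: cs).length (pvHorner (c :: cs))
      (fun n => c * n ^ cs.length + pvHorner cs n) (fun n => pv_horner_cons c cs n)]
    simp only [List.length_cons]
    rw [pv_iter_add]
    rw [pv_iter_smul]
    rw [pv_iter_pow cs.length j, mul_zero, zero_add]
    exact pv_iter_mono cs.length (cs.length + 1) _ (Nat.le_succ _) ih j

-- pyRange map = pvSeedList
theorem pv_map_pyRange_seedList (f : Int → Int) (m : Nat) : ∀ a : Int,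
    (PySem.List.pyRange a (a + (m : Int)) 1).map f = pvSeedList f m a := by
  induction m with
  | zero => intro a; rw [PySem.List.pyRange_one_eq_nil (by omega)]; rfl
  | succ m ih =>
    intro a
    rw [PySem.List.pyRange_one_cons (by omega)]
    simp only [List.map_cons, pvSeedList]
    have : a + ((m : Int) + 1) = (a + 1) + (m : Int) := by ring
    rw [show (a + (((m : Nat) + 1 : Nat) : Int)) = (a + 1) + (m : Int) by push_cast; ring]
    exact congrArg (f a :: ·) (ih (a + 1))

theorem pv_seedList_append (f : Int → Int) (a : Nat) : ∀ (b : Nat) (j : Int),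
    pvSeedList f a j ++ pvSeedList f b (j + a) = pvSeedList f (a + b) j := by
  induction a with
  | zero => intro b j; simp [pvSeedList]
  | succ a ih =>
    intro b j
    simp only [pvSeedList, List.cons_append]
    rw [show j + ((a : Nat) + 1 : Nat) = (j + 1) + (a : Int) by push_cast; ring]
    rw [ih b (j + 1)]
    rw [show (a : Nat) + 1 + b = (a + b) + 1 by omega]
    rfl

theorem pv_seedList_zero_fun (m : Nat) : ∀ j, pvSeedList (fun _ => (0:Int)) m j = List.replicate m 0 := by
  induction m with
  | zero => intro j; rfl
  | succ m ih => intro j; simp [pvSeedList, List.replicate, ih]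

theorem pv_seedList_congr (f g : Int → Int) (h : ∀ n, f n = g n) (m : Nat) : ∀ j,
    pvSeedList f m j = pvSeedList g m j := by
  induction m with
  | zero => intro j; rfl
  | succ m ih => intro j; simp [pvSeedList, h, ih]

-- structure of the difference rows over a seed window
theorem pv_diffsRow_seedList (f : Int → Int) (m : Nat) : ∀ j,
    pvDiffsRow (pvSeedList f (m+1) j) = pvSeedList (pvDelta f) m j := by
  induction m with
  | zero => intro j; rfl
  | succ m ih =>
    intro j
    show pvDiffsRow (f j :: f (j+1) :: pvSeedList f m (j+1+1)) = _
    have step : ∀ (x y : Int) (t : List Int),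
        pvDiffsRow (x :: y :: t) = (y - x) :: pvDiffsRow (y :: t) := by
      intro x y t; simp [pvDiffsRow]
    rw [step]
    have := ih (j + 1)
    show (f (j+1) - f j) :: pvDiffsRow (pvSeedList f (m+1) (j+1)) = _
    rw [this]
    rfl

theorem pv_seedList_getLast? (f : Int → Int) (m : Nat) : ∀ j,
    (pvSeedList f (m+1) j).getLast? = some (f (j + m)) := by
  induction m with
  | zero => intro j; simp [pvSeedList]
  | succ m ih =>
    intro j
    show (f j :: f (j+1) :: pvSeedList f m (j+1+1)).getLast? = _
    rw [List.getLast?_cons_cons]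
    have h := ih (j + 1)
    rw [show j + 1 + (m : Int) = j + (((m:Nat)+1 : Nat) : Int) by push_cast; ring] at h
    exact h

-- RD exposes its last (lowest-order) entry
theorem pv_RD_delta (f : Int → Int) (m : Nat) : ∀ a,
    pvRD f (m+1) a = pvRD (pvDelta f) m (a - 1) ++ [f a] := by
  induction m generalizing f with
  | zero =>
    intro a
    show [pvDeltaIter 1 f (a - ((0:Nat)+1:Nat)), f a] = [pvDelta f (a - 1), f a]
    have : pvDeltaIter 1 f = pvDelta f := rfl
    rw [this]
    norm_num
  | succ m ih =>
    intro a
    show pvDeltaIter (m+2) f (a - (((m:Nat)+1+1:Nat))) :: pvRD f (m+1) a = _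
    rw [ih f a]
    show _ = (pvDeltaIter (m+1) (pvDelta f) ((a-1) - (((m:Nat)+1:Nat))) :: pvRD (pvDelta f) m (a-1)) ++ [f a]
    simp only [List.cons_append]
    congr 1
    show pvDeltaIter (m+2) f _ = pvDeltaIter (m+1) (pvDelta f) _
    have : pvDeltaIter (m+2) f = pvDeltaIter (m+1) (pvDelta f) := rfl
    rw [this]
    congr 1
    push_cast
    ring

-- the collected last elements, reversed, form the RD vector
theorem pv_collect_seedList (f : Int → Int) (m : Nat) : ∀ j,
    pvCollectLasts (pvSeedList f (m+1) j) = (pvRD f m (j + m)).reverse := by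
  induction m generalizing f with
  | zero =>
    intro j
    show pvCollectLasts [f j] = _
    simp [pvCollectLasts, pvDiffsRow, pvRD]
  | succ m ih =>
    intro j
    push_cast
    have hseed : pvSeedList f (m+2) j = f j :: pvSeedList f (m+1) (j+1) := rfl
    have hrow : pvDiffsRow (pvSeedList f (m+2) j) = pvSeedList (pvDelta f) (m+1) j :=
      pv_diffsRow_seedList f (m+1) j
    have hlast : ∀ (hne : f j :: pvSeedList f (m+1) (j+1) ≠ []),
        (f j :: pvSeedList f (m+1) (j+1)).getLast hne = f (j + (m:Int) + 1) := by
      intro hne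
      have h : (f j :: pvSeedList f (m+1) (j+1)).getLast? = some (f (j + (m:Int) + 1)) := by
        show (f j :: f (j+1) :: pvSeedList f m (j+1+1)).getLast? = _
        rw [List.getLast?_cons_cons]
        have h2 := pv_seedList_getLast? f m (j+1)
        rw [show j + 1 + (m:Int) = j + (m:Int) + 1 by ring] at h2
        exact h2
      rw [List.getLast?_eq_some_getLast hne] at h
      exact Option.some.inj h
    rw [show j + ((m:Int) + 1) = j + (m:Int) + 1 by ring]
    rw [pv_RD_delta f m (j + (m:Int) + 1)]
    rw [List.reverse_append]
    simp only [List.reverse_cons, List.reverse_nil, List.nil_append, List.singleton_append]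
    rw [show j + (m:Int) + 1 - 1 = j + (m:Int) by ring]
    rw [hseed]
    simp only [pvCollectLasts]
    rw [hlast, ← hseed, hrow, ih (pvDelta f) j]


-- one prefix-sum pass advances the RD vector by one point
theorem pv_PS_RD (m : Nat) : ∀ (f : Int → Int) (j : Int),
    pvPS (pvDeltaIter (m+1) f (j - m)) (pvRD f m j) = pvRD f m (j + 1) := by
  induction m with
  | zero =>
    intro f j
    show [(pvDeltaIter 1 f (j - 0)) + f j] = [f (j + 1)]
    have h : pvDeltaIter 1 f (j - 0) = f (j - 0 + 1) - f (j - 0) := rfl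
    rw [h]
    norm_num
  | succ m ih =>
    intro f j
    simp only [pvRD, pvPS]
    push_cast
    have hstep : pvDeltaIter (m+1+1) f (j - ((m:Int)+1)) + pvDeltaIter (m+1) f (j - ((m:Int)+1))
        = pvDeltaIter (m+1) f (j - m) := by
      rw [pv_iter_outer]
      simp only [pvDelta]
      rw [show j - ((m:Int)+1) + 1 = j - m by ring]
      ring
    rw [hstep, ih f j]
    rw [show j + 1 - ((m:Int)+1) = j - m by ring]

theorem pv_RD_sum (f : Int → Int) (m : Nat) : ∀ j,
    (pvRD f m j).sum = f (j + 1) - pvDeltaIter (m+1) f (j - m) := by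
  induction m with
  | zero =>
    intro j
    show f j + 0 = f (j + 1) - pvDeltaIter 1 f (j - 0)
    have h : pvDeltaIter 1 f (j - 0) = f (j - 0 + 1) - f (j - 0) := rfl
    rw [h]; ring_nf
  | succ m ih =>
    intro j
    simp only [pvRD, List.sum_cons]
    push_cast
    rw [ih j]
    rw [pv_iter_outer (m+1) f]
    simp only [pvDelta]
    rw [show j - ((m:Int)+1) + 1 = j - m by ring]
    ring

-- the python accumulator loop computes (prefix sums, total)
theorem pv_foldl_ps (l : List Int) : ∀ (init : List Int) (a : Int),
    l.foldl (fun (p : List Int × Int) x => (p.1 ++ [p.2 + x], p.2 + x)) (init, a)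
      = (init ++ pvPS a l, a + l.sum) := by
  induction l with
  | nil => intro init a; simp [pvPS]
  | cons x xs ih =>
    intro init a
    simp only [List.foldl_cons]
    rw [ih (init ++ [a + x]) (a + x)]
    simp [pvPS, List.append_assoc]
    ring

-- the extension loop appends f (j+1), f (j+2), ...
theorem pv_extend_RD (f : Int → Int) (m : Nat)
    (hvan : ∀ n, pvDeltaIter (m+1) f n = 0) :
    ∀ (k : Nat) (j : Int) (series : List Int),
    pvExtend k ((pvRD f m j)) series = series ++ pvSeedList f k (j + 1) := by
  intro k
  induction k with
  | zero => intro j series; simp [pvExtend, pvSeedList]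
  | succ k ih =>
    intro j series
    rw [pvExtend]
    rw [pv_foldl_ps (pvRD f m j) [] 0]
    simp only [List.nil_append]
    have hps : pvPS 0 (pvRD f m j) = pvRD f m (j + 1) := by
      have := pv_PS_RD m f j
      rwa [hvan (j - m)] at this
    have hsum : (0 : Int) + (pvRD f m j).sum = f (j + 1) := by
      rw [pv_RD_sum f m j, hvan (j - m)]
      ring
    rw [hps, hsum, ih (j + 1) (series ++ [f (j + 1)])]
    rw [List.append_assoc]
    rfl

-- ===== VERDICT (by name: the statement is the Claim_ definition above) =====
theorem compact_poly_series_py_spec : Claim_equal_compact_poly_series_py := by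
  intro coef n_terms _
  unfold Spec_compact_poly_series_py compact_poly_series_py compact_poly_series_py_alt
  rw [PySem.List.foldl_append_singleton_eq_map, List.nil_append]
  have hA : (PySem.List.pyRange 0 n_terms 1).map (fun n => coef.foldl (fun val c => val * n + c) 0)
      = pvSeedList (pvHorner coef) n_terms.toNat 0 := by
    have hr : PySem.List.pyRange 0 n_terms 1 = PySem.List.pyRange 0 (0 + (n_terms.toNat : Int)) 1 := by
      by_cases h : 0 ≤ n_terms
      · rw [Int.toNat_of_nonneg h]; norm_num
      · rw [PySem.List.pyRange_one_eq_nil (by omega), PySem.List.pyRange_one_eq_nil (by omega)]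
    rw [hr, pv_map_pyRange_seedList (fun n => coef.foldl (fun val c => val * n + c) 0) n_terms.toNat 0]
    exact pv_seedList_congr _ _ (fun n => rfl) _ _
  rw [hA]
  by_cases hemp : coef.isEmpty
  · rw [if_pos hemp]
    have : coef = [] := List.isEmpty_iff.mp hemp
    subst this
    rw [pv_seedList_congr (pvHorner []) (fun _ => 0) (fun n => rfl) n_terms.toNat 0]
    rw [pv_seedList_zero_fun]
  · rw [if_neg hemp]
    have hlen : 1 ≤ coef.length := by
      cases coef with
      | nil => simp at hemp
      | cons a l => simp
    set P := pvHorner coef with hP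
    by_cases hle : n_terms ≤ (coef.length : Int)
    · rw [if_pos hle]
      have hmin : min n_terms (coef.length : Int) = n_terms := min_eq_left hle
      rw [hmin]
      have hr : PySem.List.pyRange 0 n_terms 1 = PySem.List.pyRange 0 (0 + (n_terms.toNat : Int)) 1 := by
        by_cases h : 0 ≤ n_terms
        · rw [Int.toNat_of_nonneg h]; norm_num
        · rw [PySem.List.pyRange_one_eq_nil (by omega), PySem.List.pyRange_one_eq_nil (by omega)]
      rw [hr, pv_map_pyRange_seedList]
    · rw [if_neg hle]
      rw [not_le] at hle
      have hmin : min n_terms (coef.length : Int) = (coef.length : Int) := min_eq_right (le_of_lt hle)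
      rw [hmin]
      obtain ⟨m, hm⟩ : ∃ m : Nat, coef.length = m + 1 := ⟨coef.length - 1, by omega⟩
      have hseed : (PySem.List.pyRange 0 (coef.length : Int) 1).map (fun n => P n)
          = pvSeedList P (m+1) 0 := by
        rw [show ((coef.length : Int)) = 0 + (((m+1 : Nat)) : Int) by rw [hm]; push_cast; ring]
        exact pv_map_pyRange_seedList P (m+1) 0
      rw [hseed]
      rw [pv_collect_seedList P m 0, List.reverse_reverse]
      have hvan : ∀ n, pvDeltaIter (m+1) P n = 0 := by
        intro n
        have := pv_horner_vanish coef n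
        rwa [hm] at this
      rw [pv_extend_RD P m hvan (n_terms - (coef.length:Int)).toNat (0 + m) _]
      have hsplit : pvSeedList P (m+1) 0 ++ pvSeedList P (n_terms - (coef.length:Int)).toNat (0 + m + 1)
          = pvSeedList P ((m+1) + (n_terms - (coef.length:Int)).toNat) 0 := by
        have := pv_seedList_append P (m+1) (n_terms - (coef.length:Int)).toNat 0
        rw [show (0 : Int) + ((m+1 : Nat) : Int) = 0 + m + 1 by push_cast; ring] at this
        exact this
      rw [hsplit]
      congr 1
      omega
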